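-- pv_equiv track=rewrite | github.com/piotrhelm/NESTFUL | data_v2/executable_functions/py_code_file_3018.py | scale_vectors
-- ===== SOURCE A (Python) =====
-- from typing import List
--
-- def scale_vectors(vector1: List[int], vector2: List[int]) -> List[int]:
--
--     """Scales each element in `vector1` with the corresponding element in `vector2`.
--
--     If `vector2` is shorter than `vector1`, the function extends `vector2` to the length of `vector1`
--
--     by repeating the last element of `vector2`.
--
--     Args:
--
--         vector1: A list of integers.
--
--         vector2: A list of integers.
--
--     Returns:
--
--         A new list with the scaled values of `vector1`.
--
--     """
--
--     scaled_vector = []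
--
--     vector2_length = len(vector2)
--
--     for i, elem in enumerate(vector1):
--
--         if i < vector2_length:
--
--             scaled_elem = elem * vector2[i]
--
--         else:
--
--             scaled_elem = elem * vector2[-1]
--
--         scaled_vector.append(scaled_elem)
--
--     return scaled_vector
-- ===== SOURCE B (Python) =====
-- def scale_vectors(vector1, vector2):
--     """Split decomposition: multiply the overlapping prefix with zip, then
--     scale the leftover tail of vector1 (beyond len(vector2)) by vector2's
--     last element as a scalar."""
--     result = [a * b for a, b in zip(vector1, vector2)]
--     tail = vector1[len(vector2):]
--     if tail:
--         last = vector2[-1]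
--         result.extend(a * last for a in tail)
--     return result
-- ===== Notes on version B (the rewrite author's own statement) =====
-- stated objective: alternative
-- what changed: Replaces A's single indexed loop with a per-element branch by a region split: the overlapping prefix is multiplied pairwise via zip, and the leftover tail of vector1 is scaled by vector2's last element as a scalar in a second pass; no index clamping or per-element comparison remains.
import Mathlib
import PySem

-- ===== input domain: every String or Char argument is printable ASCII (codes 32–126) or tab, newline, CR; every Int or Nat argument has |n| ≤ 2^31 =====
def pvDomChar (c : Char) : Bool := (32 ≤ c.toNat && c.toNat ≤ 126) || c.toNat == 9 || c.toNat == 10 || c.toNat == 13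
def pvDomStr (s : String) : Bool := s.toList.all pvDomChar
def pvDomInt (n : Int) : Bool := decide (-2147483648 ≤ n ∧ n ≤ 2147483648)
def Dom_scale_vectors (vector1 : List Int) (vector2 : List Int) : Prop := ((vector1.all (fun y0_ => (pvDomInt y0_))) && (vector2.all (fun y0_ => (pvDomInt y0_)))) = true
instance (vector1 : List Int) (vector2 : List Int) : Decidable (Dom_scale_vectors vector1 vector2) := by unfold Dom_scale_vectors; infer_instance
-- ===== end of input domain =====

-- B splits the work by region — zip the overlapping prefix, then scale vector1's leftover tail
-- by vector2's last element as a scalar — instead of A's indexed loop with a per-element branch.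

-- ===== PORT A =====
def scale_vectors (vector1 : List Int) (vector2 : List Int) : List Int :=
  let vector2_length : Int := vector2.length
  (PySem.List.enumerate vector1).foldl
    (fun scaled_vector p =>
      let scaled_elem :=
        if p.1 < vector2_length then
          p.2 * PySem.List.pyGetD vector2 p.1 0
        else
          p.2 * PySem.List.pyGetD vector2 (-1) 0
      scaled_vector ++ [scaled_elem]) []

-- ===== PORT B =====
def scale_vectors_alt (vector1 : List Int) (vector2 : List Int) : List Int :=
  let result := (vector1.zip vector2).map (fun p => p.1 * p.2)
  let tail := PySem.List.slice vector1 (some (vector2.length : Int)) none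
  if tail ≠ [] then
    let last := PySem.List.pyGetD vector2 (-1) 0
    result ++ tail.map (fun a => a * last)
  else result

-- ===== PRECONDITION & SPEC =====
-- Pre_ excludes exactly the inputs where A raises IndexError: vector2 = [] with vector1 ≠ [] (vector2[-1]).
def Pre_scale_vectors (vector1 : List Int) (vector2 : List Int) : Prop :=
  vector1 = [] ∨ vector2 ≠ []
instance (vector1 : List Int) (vector2 : List Int) : Decidable (Pre_scale_vectors vector1 vector2) := by unfold Pre_scale_vectors; infer_instance

def pvWitness_scale_vectors : List Int × List Int := ([2, 3, 4], [5, 6])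

def Spec_scale_vectors (vector1 : List Int) (vector2 : List Int) (out : List Int) : Prop := out = scale_vectors_alt vector1 vector2
instance (vector1 : List Int) (vector2 : List Int) (out : List Int) : Decidable (Spec_scale_vectors vector1 vector2 out) := by unfold Spec_scale_vectors; infer_instance

-- ===== CLAIM =====
def Claim_equal_scale_vectors : Prop := ∀ (vector1 : List Int) (vector2 : List Int), Dom_scale_vectors vector1 vector2 → Pre_scale_vectors vector1 vector2 → Spec_scale_vectors vector1 vector2 (scale_vectors vector1 vector2)

-- ===== LEMMAS AND PROOFS =====

-- A as a map over the enumeration (loop-shape lemma).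
lemma scale_vectors_eq_map (vector1 vector2 : List Int) :
    scale_vectors vector1 vector2 =
      (PySem.List.enumerate vector1).map
        (fun p => if p.1 < (vector2.length : Int) then
            p.2 * PySem.List.pyGetD vector2 p.1 0
          else
            p.2 * PySem.List.pyGetD vector2 (-1) 0) := by
  rw [scale_vectors, PySem.List.foldl_append_singleton_eq_map]
  rfl

-- B with the slice evaluated to a drop and the lets zeta-reduced.
lemma scale_vectors_alt_unfold (vector1 vector2 : List Int) :
    scale_vectors_alt vector1 vector2 =
      if vector1.drop vector2.length ≠ [] then
        (vector1.zip vector2).map (fun p => p.1 * p.2) ++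
          (vector1.drop vector2.length).map (fun a => a * PySem.List.pyGetD vector2 (-1) 0)
      else (vector1.zip vector2).map (fun p => p.1 * p.2) := by
  rw [scale_vectors_alt]
  rw [PySem.List.slice_from_natCast]

-- ===== VERDICT =====
theorem scale_vectors_spec : Claim_equal_scale_vectors := by
  intro v1 v2 _ hpre
  show scale_vectors v1 v2 = scale_vectors_alt v1 v2
  rw [scale_vectors_eq_map, scale_vectors_alt_unfold]
  by_cases hd : v1.drop v2.length = []
  · -- no tail: v1.length ≤ v2.length, everything is the zipped prefix
    rw [if_neg (by simp [hd])]
    have hle : v1.length ≤ v2.length := List.drop_eq_nil_iff.mp hd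
    apply List.ext_getElem
    · simp [PySem.List.length_enumerate]; omega
    · intro k hk1 hk2
      have hkv : k < v1.length := by simpa [PySem.List.length_enumerate] using hk1
      have hk2' : k < v2.length := by omega
      simp only [List.getElem_map, PySem.List.getElem_enumerate, List.getElem_zip]
      rw [if_pos (by omega)]
      simp [PySem.List.pyGetD_natCast, hk2']
  · -- tail nonempty: v2.length < v1.length; prefix pairs, then scalar * last
    rw [if_pos hd]
    have hlt : v2.length < v1.length := by
      by_contra h
      exact hd (List.drop_eq_nil_iff.mpr (by omega))
    have hv2 : v2 ≠ [] := by
      rcases hpre with h | h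
      · subst h; simp at hlt
      · exact h
    have hv2len : 0 < v2.length := List.length_pos_iff.mpr hv2
    apply List.ext_getElem
    · simp [PySem.List.length_enumerate]; omega
    · intro k hk1 hk2
      have hkv : k < v1.length := by simpa [PySem.List.length_enumerate] using hk1
      simp only [List.getElem_map, PySem.List.getElem_enumerate]
      by_cases hk : k < v2.length
      · rw [if_pos (by omega)]
        rw [List.getElem_append_left (by simp; omega)]
        simp [PySem.List.pyGetD_natCast, hk]
      · rw [if_neg (by omega)]
        rw [List.getElem_append_right (by simp; omega)]
        simp only [List.getElem_map, List.getElem_drop]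
        congr 1
        exact getElem_congr_idx (by simp; omega)
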